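-- pv_equiv track=rewrite | github.com/beAgun/yandex_trainings4.0 | final/B.py | f
-- ===== SOURCE A (Python) =====
-- from math import floor
--
-- def f(s):
--
--     n = len(s)
--     p = 10 ** 9 + 7
--     x_ = 263
--     h = [0] * (n + 1)
--     h_op = [0] * (n + 1)
--     x = [0] * (n + 1)
--     x[0] = 1
--     s = ' ' + s
--
--     for i in range(1, n + 1):
--         h[i] = (h[i - 1] * x_ + ord(s[i])) % p
--         h_op[i] = (h_op[i - 1] * x_ + ord(s[-i])) % p
--         x[i] = (x[i - 1] * x_) % p
--
--     z = [0] * (n + 1)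
--     z[1] = 1
--
--     for i in range(2, n + 1):
--         l, r = i, i + i - 1
--         if s[i] != s[1]:
--             continue
--         while l <= r:
--             m = floor((r + l) / 2)
--             slen = m - i + 1
--             if ((h_op[(n - i + 1) + slen - 1] + h[0] * x[slen]) % p ==
--                 (h[slen] + h_op[(n - i + 1) - 1] * x[slen]) % p):
--                 z[i] = slen
--                 l = m + 1
--             else:
--                 r = m - 1
--
--     z.pop(0)
--     return z
-- ===== SOURCE B (Python) =====
-- def f(s):
--     # A's exact output depends on its rolling-hash bisection (hash collisions are
--     # observable in the result), so the hash semantics is kept; the implementation is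
--     # restructured: hashes of s and reversed s built by simple append-loops, an
--     # algebraically simplified probe test, a recursive last-true bisection, and the
--     # result assembled by a comprehension instead of array writes and a pop.
--     n = len(s)
--     p, x = 10 ** 9 + 7, 263
--
--     fwd = [0]                       # fwd[k] = hash of s[:k]
--     for c in s:
--         fwd.append((fwd[-1] * x + ord(c)) % p)
--     bwd = [0]                       # bwd[k] = hash of s[::-1][:k]
--     for c in reversed(s):
--         bwd.append((bwd[-1] * x + ord(c)) % p)
--     pw = [1]                        # pw[k] = x**k mod p
--     for _ in s:
--         pw.append(pw[-1] * x % p)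
--
--     def hit(i, L):
--         # hash test: reversed substring of length L ending at i == prefix of length L
--         return bwd[n - i + L] == (fwd[L] + bwd[n - i] * pw[L]) % p
--
--     def search(i, lo, hi, best):    # last-true bisection, recursively
--         if lo > hi:
--             return best
--         mid = (lo + hi) // 2
--         L = mid - i + 1
--         if hit(i, L):
--             return search(i, mid + 1, hi, L)
--         return search(i, lo, mid - 1, best)
--
--     return [1 if i == 1 else (search(i, i, 2 * i - 1, 0) if s[i - 1] == s[0] else 0)
--             for i in range(1, n + 1)]
-- ===== Notes on version B (the rewrite author's own statement) =====
-- stated objective: simpler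
-- what changed: A's exact output depends on its rolling-hash bisection (hash collisions are observable in the returned values, so an exactly-equal B must keep that semantics); B restructures it throughout: the two hash tables are built by plain append-loops over s and reversed(s) instead of preallocated arrays filled by index with negative indexing, the probe test is algebraically simplified (the dead h[0]*x[slen] term and one redundant mod are dropped), the while-loop binary search becomes a recursive last-true bisection, and the result list is a comprehension instead of array mutation plus pop(0).
import Mathlib
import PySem

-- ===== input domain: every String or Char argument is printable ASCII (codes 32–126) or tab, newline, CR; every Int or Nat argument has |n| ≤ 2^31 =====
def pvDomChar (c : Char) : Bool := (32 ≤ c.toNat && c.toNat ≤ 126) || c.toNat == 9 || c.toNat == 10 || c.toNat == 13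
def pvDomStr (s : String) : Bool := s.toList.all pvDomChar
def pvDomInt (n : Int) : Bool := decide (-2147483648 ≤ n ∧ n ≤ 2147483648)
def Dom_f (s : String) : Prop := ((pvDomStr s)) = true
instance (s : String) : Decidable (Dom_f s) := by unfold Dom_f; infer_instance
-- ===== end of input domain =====

-- B keeps A's rolling-hash + last-true-bisection semantics (its hash collisions are observable
-- in the returned values, so an exactly-equal B must) but restructures every part of it:
-- hash tables built by append-loops over s and reversed(s), a simplified probe test, a
-- recursive bisection, and a comprehension instead of array mutation plus pop(0).

-- ===== PORT A =====
def pvP : Int := 10 ^ 9 + 7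
def pvX : Int := 263

-- ord(s[i]) for the sentinel-prefixed string; every access A performs is in range
def ordAt (cs : List Char) (i : Int) : Int := (((PySem.List.pyGet? cs i).getD ' ').toNat : Int)

-- the first for-loop: h[i], h_op[i], x[i] for i = 1..fuel (arrays preallocated as [0]*(n+1))
def hLoopA (cs : List Char) (n : Nat) : Nat → List Int × List Int × List Int
  | 0 => (List.replicate (n+1) 0, List.replicate (n+1) 0, (List.replicate (n+1) 0).set 0 1)
  | i+1 =>
    let t := hLoopA cs n i
    (t.1.set (i+1) (PySem.Int.mod (t.1.getD i 0 * pvX + ordAt cs ((i:Int)+1)) pvP),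
     t.2.1.set (i+1) (PySem.Int.mod (t.2.1.getD i 0 * pvX + ordAt cs (-((i:Int)+1))) pvP),
     t.2.2.set (i+1) (PySem.Int.mod (t.2.2.getD i 0 * pvX) pvP))

-- the inner while-loop (binary search); m = floor((r+l)/2) ported as floor division.
-- fuel = r+1-l at the call site; it strictly bounds the iteration count, so the 0 case is unreachable.
def bsearchA (h hop x : List Int) (n i : Nat) : Nat → Int → Int → Int → Int
  | 0, _, _, cur => cur
  | fuel+1, l, r, cur =>
    if l ≤ r then
      let m := PySem.Int.floordiv (r + l) 2
      let slen := m - (i:Int) + 1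
      if PySem.Int.mod (PySem.List.pyGetD hop (((n:Int) - (i:Int) + 1) + slen - 1) 0 +
            PySem.List.pyGetD h 0 0 * PySem.List.pyGetD x slen 0) pvP
         = PySem.Int.mod (PySem.List.pyGetD h slen 0 +
            PySem.List.pyGetD hop (((n:Int) - (i:Int) + 1) - 1) 0 * PySem.List.pyGetD x slen 0) pvP
      then bsearchA h hop x n i fuel (m+1) r slen
      else bsearchA h hop x n i fuel l (m-1) cur
    else cur

-- the second for-loop: z[i] for i = 2..fuel+1; z = [0]*(n+1) with z[1] = 1 first
def zLoopA (h hop x : List Int) (cs : List Char) (n : Nat) : Nat → List Int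
  | 0 => (List.replicate (n+1) 0).set 1 1
  | j+1 =>
    let z := zLoopA h hop x cs n j
    if PySem.List.pyGet? cs ((j:Int)+2) ≠ PySem.List.pyGet? cs 1 then z
    else z.set (j+2) (bsearchA h hop x n (j+2) (j+2) ((j:Int)+2) (((j:Int)+2) + ((j:Int)+2) - 1) 0)

def f (s : String) : List Int :=
  let n := s.toList.length
  let cs := ' ' :: s.toList           -- s = ' ' + s
  let t := hLoopA cs n n
  let z := zLoopA t.1 t.2.1 t.2.2 cs n (n - 1)
  ((PySem.List.pop? z 0).map (·.2)).getD []   -- z.pop(0); return z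

-- ===== PORT B =====
-- fwd = [0]; for c in s: fwd.append((fwd[-1]*x + ord(c)) % p)
def fwdB (l : List Char) : List Int :=
  l.foldl (fun acc c =>
    acc ++ [PySem.Int.mod (PySem.List.pyGetD acc (-1) 0 * 263 + (c.toNat : Int)) (10 ^ 9 + 7)]) [0]

-- bwd: the same append-loop, over reversed(s)
def bwdB (l : List Char) : List Int := fwdB l.reverse

-- pw = [1]; for _ in s: pw.append(pw[-1]*x % p)
def pwB (l : List Char) : List Int :=
  l.foldl (fun acc _ =>
    acc ++ [PySem.Int.mod (PySem.List.pyGetD acc (-1) 0 * 263) (10 ^ 9 + 7)]) [1]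

-- def search(i, lo, hi, best): recursive last-true bisection over the hit(i, L) hash test.
-- fuel = hi+1-lo at the call site; it bounds the recursion depth, so the 0 case is unreachable.
def searchB (fwd bwd pw : List Int) (n i : Nat) : Nat → Int → Int → Int → Int
  | 0, _, _, best => best
  | fuel+1, lo, hi, best =>
    if lo ≤ hi then
      let mid := PySem.Int.floordiv (lo + hi) 2
      let L := mid - (i : Int) + 1
      if PySem.List.pyGetD bwd ((n : Int) - (i : Int) + L) 0
         = PySem.Int.mod (PySem.List.pyGetD fwd L 0 +
             PySem.List.pyGetD bwd ((n : Int) - (i : Int)) 0 * PySem.List.pyGetD pw L 0) (10 ^ 9 + 7)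
      then searchB fwd bwd pw n i fuel (mid + 1) hi L
      else searchB fwd bwd pw n i fuel lo (mid - 1) best
    else best

def f_alt (s : String) : List Int :=
  let l := s.toList
  let n := l.length
  (PySem.List.pyRange 1 ((n : Int) + 1) 1).map (fun i =>
    if i = 1 then 1
    else if PySem.List.pyGet? l (i - 1) = PySem.List.pyGet? l 0 then
      searchB (fwdB l) (bwdB l) (pwB l) n i.toNat i.toNat i (2 * i - 1) 0
    else 0)

-- ===== PRECONDITION & SPEC =====
-- Pre_ excludes only the empty string, on which A raises IndexError (z[1] = 1 on the array [0]).
def Pre_f (s : String) : Prop := s ≠ ""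
instance (s : String) : Decidable (Pre_f s) := by unfold Pre_f; infer_instance
def pvWitness_f : String := "ab"

def Spec_f (s : String) (out : List Int) : Prop := out = f_alt s
instance (s : String) (out : List Int) : Decidable (Spec_f s out) := by unfold Spec_f; infer_instance

-- ===== CLAIM (what is proved, stated in full; the proofs are below) =====
def Claim_equal_f : Prop := ∀ (s : String), Dom_f s → Pre_f s → Spec_f s (f s)

-- ===== LEMMAS AND PROOFS =====

-- the polynomial hash both ports tabulate, as a plain fold (proof vocabulary only)
def hashC (l : List Char) : Int := l.foldl (fun a c => (a * 263 + (c.toNat : Int)) % (10 ^ 9 + 7)) 0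

lemma pvMod_eq (a : Int) : PySem.Int.mod a pvP = a % (10 ^ 9 + 7) := by
  rw [PySem.Int.mod_eq_emod_of_pos (by norm_num [pvP])]; norm_num [pvP]

lemma hashC_nil : hashC [] = 0 := rfl

lemma hashC_append_singleton (u : List Char) (c : Char) :
    hashC (u ++ [c]) = (hashC u * 263 + (c.toNat : Int)) % (10 ^ 9 + 7) := by
  simp [hashC, List.foldl_append]

lemma hashC_bounds (u : List Char) : 0 ≤ hashC u ∧ hashC u < 10 ^ 9 + 7 := by
  induction u using List.reverseRecOn with
  | nil => norm_num [hashC]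
  | append_singleton u c ih =>
    rw [hashC_append_singleton]
    exact ⟨Int.emod_nonneg _ (by norm_num), Int.emod_lt_of_pos _ (by norm_num)⟩

lemma hashC_foldl (v : List Char) : ∀ a : Int, 0 ≤ a → a < 10 ^ 9 + 7 →
    v.foldl (fun a c => (a * 263 + (c.toNat : Int)) % (10 ^ 9 + 7)) a
      = (a * 263 ^ v.length + hashC v) % (10 ^ 9 + 7) := by
  induction v with
  | nil => intro a h0 h1; simpa [hashC] using (Int.emod_eq_of_lt h0 h1).symm
  | cons c t ih =>
    intro a h0 h1
    have hmm : ∀ x : Int, x % (10 ^ 9 + 7) ≡ x [ZMOD (10 ^ 9 + 7)] :=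
      fun x => Int.emod_emod_of_dvd x dvd_rfl
    have hb1 : (0:Int) ≤ (a * 263 + (c.toNat : Int)) % (10 ^ 9 + 7) := Int.emod_nonneg _ (by norm_num)
    have hb2 : (a * 263 + (c.toNat : Int)) % (10 ^ 9 + 7) < 10 ^ 9 + 7 := Int.emod_lt_of_pos _ (by norm_num)
    have hc1 : (0:Int) ≤ ((0:Int) * 263 + (c.toNat : Int)) % (10 ^ 9 + 7) := Int.emod_nonneg _ (by norm_num)
    have hc2 : ((0:Int) * 263 + (c.toNat : Int)) % (10 ^ 9 + 7) < 10 ^ 9 + 7 := Int.emod_lt_of_pos _ (by norm_num)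
    have hR : hashC (c :: t) = (((0:Int) * 263 + (c.toNat : Int)) % (10 ^ 9 + 7) * 263 ^ t.length + hashC t) % (10 ^ 9 + 7) := by
      show List.foldl _ _ (c :: t) = _
      rw [List.foldl_cons, ih _ hc1 hc2]
    rw [List.foldl_cons, ih _ hb1 hb2, hR, List.length_cons]
    have h1 : ((a * 263 + (c.toNat : Int)) % (10 ^ 9 + 7) * 263 ^ t.length + hashC t)
        ≡ ((a * 263 + (c.toNat : Int)) * 263 ^ t.length + hashC t) [ZMOD (10 ^ 9 + 7)] :=
      ((hmm _).mul_right _).add_right _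
    have h2 : (a * 263 ^ (t.length + 1) + (((0:Int) * 263 + (c.toNat : Int)) * 263 ^ t.length + hashC t))
        ≡ (a * 263 ^ (t.length + 1) + (((0:Int) * 263 + (c.toNat : Int)) % (10 ^ 9 + 7) * 263 ^ t.length + hashC t) % (10 ^ 9 + 7)) [ZMOD (10 ^ 9 + 7)] :=
      Int.ModEq.add_left _ ((((hmm _).mul_right _).add_right _).symm.trans (hmm _).symm)
    calc ((a * 263 + (c.toNat : Int)) % (10 ^ 9 + 7) * 263 ^ t.length + hashC t) % (10 ^ 9 + 7)
        = ((a * 263 + (c.toNat : Int)) * 263 ^ t.length + hashC t) % (10 ^ 9 + 7) := h1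
      _ = (a * 263 ^ (t.length + 1) + (((0:Int) * 263 + (c.toNat : Int)) * 263 ^ t.length + hashC t)) % (10 ^ 9 + 7) := by ring_nf
      _ = (a * 263 ^ (t.length + 1) + (((0:Int) * 263 + (c.toNat : Int)) % (10 ^ 9 + 7) * 263 ^ t.length + hashC t) % (10 ^ 9 + 7)) % (10 ^ 9 + 7) := h2

lemma hashC_append (u v : List Char) :
    hashC (u ++ v) = (hashC u * 263 ^ v.length + hashC v) % (10 ^ 9 + 7) := by
  have hb := hashC_bounds u
  show List.foldl _ _ (u ++ v) = _
  rw [List.foldl_append]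
  exact hashC_foldl v _ hb.1 hb.2

lemma ordAt_pos (l : List Char) (i : Nat) (h : i < l.length) :
    ordAt (' ' :: l) ((i : Int) + 1) = ((l[i].toNat : Nat) : Int) := by
  have hcast : ((i : Int) + 1) = ((i + 1 : Nat) : Int) := by push_cast; ring
  rw [ordAt, hcast, PySem.List.pyGet?_natCast]
  simp [List.getElem?_cons_succ, List.getElem?_eq_getElem h]

lemma ordAt_neg (l : List Char) (i : Nat) (h : i < l.length) :
    ordAt (' ' :: l) (-((i : Int) + 1)) = ((l[l.length - 1 - i]'(by omega)).toNat : Int) := by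
  have hcast : (-((i : Int) + 1)) = -(((i + 1 : Nat) : Int)) := by push_cast; ring
  rw [ordAt, hcast, PySem.List.pyGet?_neg_natCast (' ' :: l) (i + 1) (by omega) (by simp; omega)]
  have hlen : (' ' :: l).length - (i + 1) = (l.length - 1 - i) + 1 := by simp; omega
  rw [hlen, List.getElem?_cons_succ]
  simp [List.getElem?_eq_getElem (show l.length - 1 - i < l.length by omega)]

lemma hLoopA_spec (l : List Char) (i : Nat) (hi : i ≤ l.length) :
    (hLoopA (' ' :: l) l.length i).1.length = l.length + 1 ∧
    (hLoopA (' ' :: l) l.length i).2.1.length = l.length + 1 ∧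
    (hLoopA (' ' :: l) l.length i).2.2.length = l.length + 1 ∧
    (∀ k, k ≤ i → (hLoopA (' ' :: l) l.length i).1.getD k 0 = hashC (l.take k)) ∧
    (∀ k, k ≤ i → (hLoopA (' ' :: l) l.length i).2.1.getD k 0 = hashC (l.reverse.take k)) ∧
    (∀ k, k ≤ i → (hLoopA (' ' :: l) l.length i).2.2.getD k 0 = 263 ^ k % (10 ^ 9 + 7)) := by
  induction i with
  | zero =>
    refine ⟨by simp [hLoopA], by simp [hLoopA], by simp [hLoopA], ?_, ?_, ?_⟩ <;>
      · intro k hk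
        interval_cases k
        simp [hLoopA, hashC, List.getD_eq_getElem?_getD]
  | succ i ih =>
    obtain ⟨L1, L2, L3, H1, H2, H3⟩ := ih (by omega)
    have hilt : i < l.length := by omega
    refine ⟨by simp [hLoopA, L1], by simp [hLoopA, L2], by simp [hLoopA, L3], ?_, ?_, ?_⟩
    · intro k hk
      simp only [hLoopA]
      rcases Nat.lt_or_ge k (i+1) with hklt | hkge
      · simp only [List.getD_eq_getElem?_getD, List.getElem?_set_ne (show i+1 ≠ k by omega)]
        rw [← List.getD_eq_getElem?_getD]
        exact H1 k (by omega)
      · have hk1 : k = i + 1 := by omega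
        subst hk1
        simp only [List.getD_eq_getElem?_getD,
          List.getElem?_set_self (show i+1 < (hLoopA (' ' :: l) l.length i).1.length by rw [L1]; omega),
          Option.getD_some]
        rw [← List.getD_eq_getElem?_getD]
        rw [pvMod_eq, ordAt_pos l i hilt, H1 i (by omega),
          List.take_succ_eq_append_getElem hilt, hashC_append_singleton]
        norm_num [pvX]
    · intro k hk
      simp only [hLoopA]
      rcases Nat.lt_or_ge k (i+1) with hklt | hkge
      · simp only [List.getD_eq_getElem?_getD, List.getElem?_set_ne (show i+1 ≠ k by omega)]
        rw [← List.getD_eq_getElem?_getD]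
        exact H2 k (by omega)
      · have hk1 : k = i + 1 := by omega
        subst hk1
        simp only [List.getD_eq_getElem?_getD,
          List.getElem?_set_self (show i+1 < (hLoopA (' ' :: l) l.length i).2.1.length by rw [L2]; omega),
          Option.getD_some]
        rw [← List.getD_eq_getElem?_getD]
        rw [pvMod_eq, ordAt_neg l i hilt, H2 i (by omega),
          List.take_succ_eq_append_getElem (show i < l.reverse.length by simpa using hilt),
          hashC_append_singleton, List.getElem_reverse]
        norm_num [pvX]
    · intro k hk
      simp only [hLoopA]
      rcases Nat.lt_or_ge k (i+1) with hklt | hkge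
      · simp only [List.getD_eq_getElem?_getD, List.getElem?_set_ne (show i+1 ≠ k by omega)]
        rw [← List.getD_eq_getElem?_getD]
        exact H3 k (by omega)
      · have hk1 : k = i + 1 := by omega
        subst hk1
        simp only [List.getD_eq_getElem?_getD,
          List.getElem?_set_self (show i+1 < (hLoopA (' ' :: l) l.length i).2.2.length by rw [L3]; omega),
          Option.getD_some]
        rw [← List.getD_eq_getElem?_getD]
        rw [pvMod_eq, H3 i (by omega)]
        rw [show pvX = (263:Int) from rfl]
        conv_rhs => rw [pow_succ (263:Int) i, Int.mul_emod]
        norm_num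


lemma modB_eq (a : Int) : PySem.Int.mod a (10 ^ 9 + 7) = a % (10 ^ 9 + 7) :=
  PySem.Int.mod_eq_emod_of_pos (by norm_num)

-- the common core of both probe tests: the split-and-cancel argument modulo 10^9+7
lemma cond_core (l : List Char) (i Lt : Nat) (hin : i ≤ l.length) (hL1 : 1 ≤ Lt) (hLi : Lt ≤ i) :
    (hashC (l.reverse.take (l.length - i + Lt))
      = (hashC (l.take Lt) + hashC (l.reverse.take (l.length - i)) * (263 ^ Lt % (10 ^ 9 + 7))) % (10 ^ 9 + 7))
    ↔ hashC (((l.take i).drop (i - Lt)).reverse) = hashC (l.take Lt) := by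
  have hsplit : l.reverse.take (l.length - i + Lt)
      = l.reverse.take (l.length - i) ++ ((l.take i).drop (i - Lt)).reverse := by
    rw [List.take_add]
    congr 1
    rw [List.drop_reverse, show l.length - (l.length - i) = i by omega, List.take_reverse]
    rw [show (l.take i).length - Lt = i - Lt by simp; omega]
  rw [hsplit, hashC_append]
  have hlenB : (((l.take i).drop (i - Lt)).reverse).length = Lt := by simp; omega
  rw [hlenB]
  have hBb := hashC_bounds (((l.take i).drop (i - Lt)).reverse)
  have hPb := hashC_bounds (l.take Lt)
  have e2eq : (hashC (l.take Lt) + hashC (l.reverse.take (l.length - i)) * (263 ^ Lt % (10 ^ 9 + 7))) % (10 ^ 9 + 7)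
      = (hashC (l.reverse.take (l.length - i)) * 263 ^ Lt + hashC (l.take Lt)) % (10 ^ 9 + 7) := by
    have h1 : (hashC (l.take Lt) + hashC (l.reverse.take (l.length - i)) * (263 ^ Lt % (10 ^ 9 + 7)))
        ≡ (hashC (l.take Lt) + hashC (l.reverse.take (l.length - i)) * 263 ^ Lt) [ZMOD (10 ^ 9 + 7)] :=
      Int.ModEq.add_left _ (Int.ModEq.mul_left _ (Int.emod_emod_of_dvd _ dvd_rfl))
    calc (hashC (l.take Lt) + hashC (l.reverse.take (l.length - i)) * (263 ^ Lt % (10 ^ 9 + 7))) % (10 ^ 9 + 7)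
        = (hashC (l.take Lt) + hashC (l.reverse.take (l.length - i)) * 263 ^ Lt) % (10 ^ 9 + 7) := h1
      _ = (hashC (l.reverse.take (l.length - i)) * 263 ^ Lt + hashC (l.take Lt)) % (10 ^ 9 + 7) := by
          ring_nf
  rw [e2eq]
  constructor
  · intro h
    have hmod : hashC (((l.take i).drop (i - Lt)).reverse) % (10 ^ 9 + 7)
        = hashC (l.take Lt) % (10 ^ 9 + 7) :=
      Int.ModEq.add_left_cancel' (hashC (l.reverse.take (l.length - i)) * 263 ^ Lt) h
    rwa [Int.emod_eq_of_lt hBb.1 hBb.2, Int.emod_eq_of_lt hPb.1 hPb.2] at hmod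
  · intro h
    rw [h]

lemma condA_iff (l : List Char) (i : Nat) (L : Int) (h2 : 2 ≤ i) (hin : i ≤ l.length)
    (hL1 : 1 ≤ L) (hLi : L ≤ (i : Int)) :
    (PySem.Int.mod (PySem.List.pyGetD (hLoopA (' ' :: l) l.length l.length).2.1 (((l.length : Int) - (i : Int) + 1) + L - 1) 0 +
        PySem.List.pyGetD (hLoopA (' ' :: l) l.length l.length).1 0 0 *
          PySem.List.pyGetD (hLoopA (' ' :: l) l.length l.length).2.2 L 0) pvP
      = PySem.Int.mod (PySem.List.pyGetD (hLoopA (' ' :: l) l.length l.length).1 L 0 +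
        PySem.List.pyGetD (hLoopA (' ' :: l) l.length l.length).2.1 (((l.length : Int) - (i : Int) + 1) - 1) 0 *
          PySem.List.pyGetD (hLoopA (' ' :: l) l.length l.length).2.2 L 0) pvP)
    ↔ hashC (((l.take i).drop (i - L.toNat)).reverse) = hashC (l.take L.toNat) := by
  obtain ⟨Le1, Le2, Le3, H1, H2, H3⟩ := hLoopA_spec l l.length (le_refl _)
  have c1 : ((l.length : Int) - (i : Int) + 1) + L - 1 = ((l.length - i + L.toNat : Nat) : Int) := by omega
  have c2 : ((l.length : Int) - (i : Int) + 1) - 1 = ((l.length - i : Nat) : Int) := by omega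
  rw [c1, c2]
  simp only [PySem.List.pyGetD_natCast, PySem.List.pyGetD_zero,
    PySem.List.pyGetD_of_nonneg _ _ (show (0:Int) ≤ L by omega)]
  rw [H2 _ (by omega), H1 0 (by omega), H3 _ (by omega), H1 _ (by omega), H2 _ (by omega),
    pvMod_eq, pvMod_eq]
  rw [show l.take 0 = ([] : List Char) from List.take_zero, hashC_nil, zero_mul, add_zero]
  rw [Int.emod_eq_of_lt (hashC_bounds _).1 (hashC_bounds _).2]
  exact cond_core l i L.toNat hin (by omega) (by omega)

lemma fwdB_char (l : List Char) :
    fwdB l = (List.range (l.length + 1)).map (fun k => hashC (l.take k)) := by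
  induction l using List.reverseRecOn with
  | nil => simp [fwdB, hashC]
  | append_singleton u c ih =>
    have hne : fwdB u ≠ [] := by rw [ih]; simp
    have hstep : fwdB (u ++ [c])
        = fwdB u ++ [PySem.Int.mod (PySem.List.pyGetD (fwdB u) (-1) 0 * 263 + (c.toNat : Int)) (10 ^ 9 + 7)] := by
      simp [fwdB, List.foldl_append]
    have hopt : (fwdB u).getLast? = some (hashC u) := by
      rw [ih, List.getLast?_eq_getElem?]
      simp
    have hlast : PySem.List.pyGetD (fwdB u) (-1) 0 = hashC u := by
      rw [PySem.List.pyGetD_neg_one _ _ hne]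
      exact Option.some.inj ((List.getLast?_eq_some_getLast hne).symm.trans hopt)
    rw [hstep, hlast, modB_eq, ← hashC_append_singleton, ih]
    rw [show (u ++ [c]).length + 1 = (u.length + 1) + 1 by simp]
    conv_rhs => rw [List.range_succ, List.map_append]
    congr 1
    · apply List.map_congr_left
      intro k hk
      have hk' : k ≤ u.length := by have := List.mem_range.mp hk; omega
      rw [List.take_append_of_le_length hk']
    · have hfull : (u ++ [c]).take (u.length + 1) = u ++ [c] := by
        apply List.take_of_length_le
        simp
      simp [hfull]

lemma pwB_char (l : List Char) :
    pwB l = (List.range (l.length + 1)).map (fun k => 263 ^ k % (10 ^ 9 + 7)) := by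
  induction l using List.reverseRecOn with
  | nil => simp [pwB]
  | append_singleton u c ih =>
    have hne : pwB u ≠ [] := by rw [ih]; simp
    have hstep : pwB (u ++ [c])
        = pwB u ++ [PySem.Int.mod (PySem.List.pyGetD (pwB u) (-1) 0 * 263) (10 ^ 9 + 7)] := by
      simp [pwB, List.foldl_append]
    have hopt : (pwB u).getLast? = some (263 ^ u.length % (10 ^ 9 + 7)) := by
      rw [ih, List.getLast?_eq_getElem?]
      simp
    have hlast : PySem.List.pyGetD (pwB u) (-1) 0 = 263 ^ u.length % (10 ^ 9 + 7) := by
      rw [PySem.List.pyGetD_neg_one _ _ hne]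
      exact Option.some.inj ((List.getLast?_eq_some_getLast hne).symm.trans hopt)
    have hval : ((263:Int) ^ u.length % (10 ^ 9 + 7) * 263) % (10 ^ 9 + 7) = (263:Int) ^ (u.length + 1) % (10 ^ 9 + 7) := by
      have hmm : (263:Int) ^ u.length % (10 ^ 9 + 7) ≡ 263 ^ u.length [ZMOD (10 ^ 9 + 7)] :=
        Int.emod_emod_of_dvd _ dvd_rfl
      have hmeq : (263:Int) ^ u.length % (10 ^ 9 + 7) * 263 ≡ 263 ^ (u.length + 1) [ZMOD (10 ^ 9 + 7)] := by
        calc (263:Int) ^ u.length % (10 ^ 9 + 7) * 263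
            ≡ 263 ^ u.length * 263 [ZMOD (10 ^ 9 + 7)] := hmm.mul_right 263
          _ = 263 ^ (u.length + 1) := (pow_succ 263 u.length).symm
      exact hmeq
    rw [hstep, hlast, modB_eq, hval, ih]
    rw [show (u ++ [c]).length + 1 = (u.length + 1) + 1 by simp]
    conv_rhs => rw [List.range_succ, List.map_append]
    simp

lemma condB_iff (l : List Char) (i : Nat) (L : Int) (hin : i ≤ l.length)
    (hL1 : 1 ≤ L) (hLi : L ≤ (i : Int)) :
    (PySem.List.pyGetD (bwdB l) ((l.length : Int) - (i : Int) + L) 0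
      = PySem.Int.mod (PySem.List.pyGetD (fwdB l) L 0 +
          PySem.List.pyGetD (bwdB l) ((l.length : Int) - (i : Int)) 0 * PySem.List.pyGetD (pwB l) L 0) (10 ^ 9 + 7))
    ↔ hashC (((l.take i).drop (i - L.toNat)).reverse) = hashC (l.take L.toNat) := by
  have c1 : ((l.length : Int) - (i : Int) + L) = ((l.length - i + L.toNat : Nat) : Int) := by omega
  have c2 : ((l.length : Int) - (i : Int)) = ((l.length - i : Nat) : Int) := by omega
  rw [c1, c2]
  simp only [PySem.List.pyGetD_natCast, PySem.List.pyGetD_of_nonneg _ _ (show (0:Int) ≤ L by omega)]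
  rw [show bwdB l = fwdB l.reverse from rfl, fwdB_char l.reverse, fwdB_char l, pwB_char l,
    List.length_reverse]
  rw [PySem.List.getD_map_range _ _ _ _ (by omega), PySem.List.getD_map_range _ _ _ _ (by omega),
    PySem.List.getD_map_range _ _ _ _ (by omega), PySem.List.getD_map_range _ _ _ _ (by omega),
    modB_eq]
  exact cond_core l i L.toNat hin (by omega) (by omega)

lemma search_eq (l : List Char) (i : Nat) (h2 : 2 ≤ i) (hin : i ≤ l.length) :
    ∀ fuel (lo hi best : Int), (i : Int) ≤ lo → hi ≤ 2 * (i : Int) - 1 →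
      bsearchA (hLoopA (' ' :: l) l.length l.length).1 (hLoopA (' ' :: l) l.length l.length).2.1
        (hLoopA (' ' :: l) l.length l.length).2.2 l.length i fuel lo hi best
      = searchB (fwdB l) (bwdB l) (pwB l) l.length i fuel lo hi best := by
  intro fuel
  induction fuel with
  | zero => intro lo hi best _ _; rfl
  | succ fuel ih =>
    intro lo hi best hlo hhi
    by_cases hlr : lo ≤ hi
    · have hmb : lo ≤ PySem.Int.floordiv (lo + hi) 2 ∧ PySem.Int.floordiv (lo + hi) 2 ≤ hi :=
        PySem.Int.floordiv_two_mid_bounds hlr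
      simp only [bsearchA, searchB]
      rw [if_pos hlr, if_pos hlr, show hi + lo = lo + hi from add_comm hi lo]
      by_cases hc : hashC (((l.take i).drop
            (i - (PySem.Int.floordiv (lo + hi) 2 - (i : Int) + 1).toNat)).reverse)
          = hashC (l.take (PySem.Int.floordiv (lo + hi) 2 - (i : Int) + 1).toNat)
      · rw [if_pos ((condA_iff l i (PySem.Int.floordiv (lo + hi) 2 - (i : Int) + 1) h2 hin
            (by omega) (by omega)).mpr hc),
          if_pos ((condB_iff l i (PySem.Int.floordiv (lo + hi) 2 - (i : Int) + 1) hin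
            (by omega) (by omega)).mpr hc)]
        exact ih _ _ _ (by omega) hhi
      · rw [if_neg (fun hh => hc ((condA_iff l i (PySem.Int.floordiv (lo + hi) 2 - (i : Int) + 1) h2 hin
            (by omega) (by omega)).mp hh)),
          if_neg (fun hh => hc ((condB_iff l i (PySem.Int.floordiv (lo + hi) 2 - (i : Int) + 1) hin
            (by omega) (by omega)).mp hh))]
        exact ih _ _ _ hlo (by omega)
    · simp only [bsearchA, searchB]
      rw [if_neg hlr, if_neg hlr]

lemma zLoopA_char (h hop x : List Int) (l : List Char) (_hn : 1 ≤ l.length) :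
    ∀ j, j ≤ l.length - 1 →
      zLoopA h hop x (' ' :: l) l.length j
        = (List.range (l.length + 1)).map (fun i =>
            if i = 0 then 0 else if i = 1 then 1 else if i ≤ j + 1 then
              (if PySem.List.pyGet? (' ' :: l) (i : Int) ≠ PySem.List.pyGet? (' ' :: l) 1 then 0
               else bsearchA h hop x l.length i i (i : Int) ((i : Int) + (i : Int) - 1) 0)
            else 0) := by
  intro j
  induction j with
  | zero =>
    intro _
    apply List.ext_getElem (by simp [zLoopA])
    intro k h1 h2
    simp only [zLoopA, List.getElem_map, List.getElem_range, List.getElem_set,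
      List.getElem_replicate]
    split_ifs <;> omega
  | succ j ih =>
    intro hj
    have hzl := ih (by omega)
    simp only [zLoopA]
    rw [hzl]
    have hcast : ((j : Int) + 2) = ((j + 2 : Nat) : Int) := by push_cast; ring
    by_cases hg : PySem.List.pyGet? (' ' :: l) ((j : Int) + 2) ≠ PySem.List.pyGet? (' ' :: l) 1
    · rw [if_pos hg]
      apply List.map_congr_left
      intro i hi
      have hilt : i < l.length + 1 := List.mem_range.mp hi
      by_cases hi0 : i = 0
      · simp [hi0]
      by_cases hi1 : i = 1
      · simp [hi1]
      by_cases hile : i ≤ j + 1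
      · rw [if_neg hi0, if_neg hi1, if_pos hile, if_neg hi0, if_neg hi1, if_pos (by omega : i ≤ j + 1 + 1)]
      · by_cases hieq : i = j + 2
        · subst hieq
          rw [if_neg hi0, if_neg hi1, if_neg hile, if_neg hi0, if_neg hi1, if_pos (by omega)]
          rw [← hcast, if_pos hg]
        · rw [if_neg hi0, if_neg hi1, if_neg hile, if_neg hi0, if_neg hi1,
            if_neg (by omega : ¬ i ≤ j + 1 + 1)]
    · rw [if_neg hg]
      apply List.ext_getElem (by simp)
      intro k h1 h2
      rw [List.getElem_set]
      simp only [List.getElem_map, List.getElem_range]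
      by_cases hk : j + 2 = k
      · subst hk
        rw [if_pos rfl, if_neg (by omega), if_neg (by omega), if_pos (by omega)]
        have hg' : ¬ PySem.List.pyGet? (' ' :: l) ((j + 2 : Nat) : Int) ≠ PySem.List.pyGet? (' ' :: l) 1 := by
          rw [← hcast]; exact hg
        rw [if_neg hg', hcast]
      · rw [if_neg hk]
        by_cases hk0 : k = 0
        · simp [hk0]
        by_cases hk1 : k = 1
        · simp [hk1]
        by_cases hkle : k ≤ j + 1
        · rw [if_neg hk0, if_neg hk1, if_pos hkle, if_neg hk0, if_neg hk1, if_pos (by omega : k ≤ j + 1 + 1)]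
        · rw [if_neg hk0, if_neg hk1, if_neg hkle, if_neg hk0, if_neg hk1,
            if_neg (by omega : ¬ k ≤ j + 1 + 1)]

lemma pyGet_cons_pos (l : List Char) (i : Nat) (hi1 : 1 ≤ i) (hi2 : i ≤ l.length) :
    PySem.List.pyGet? (' ' :: l) (i : Int) = some (l[i - 1]'(by omega)) := by
  rw [PySem.List.pyGet?_natCast]
  cases i with
  | zero => omega
  | succ m =>
    rw [List.getElem?_cons_succ, List.getElem?_eq_getElem (by omega : m < l.length)]
    simp

-- ===== VERDICT (by name: the statement is the Claim_ definition above) =====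
theorem f_spec : Claim_equal_f := by
  intro s _ hpre
  have hl : s.toList ≠ [] := fun hnil => hpre (String.toList_eq_nil_iff.mp hnil)
  have hn : 1 ≤ s.toList.length := List.length_pos_iff.mpr hl
  show f s = f_alt s
  simp only [f, f_alt]
  rw [zLoopA_char _ _ _ s.toList hn (s.toList.length - 1) (le_refl _)]
  rw [List.range_succ_eq_map, List.map_cons, PySem.List.pop?_zero_cons]
  simp only [Option.map_some, Option.getD_some, List.map_map]
  rw [PySem.List.pyRange_one, show ((s.toList.length : Int) + 1 - 1).toNat = s.toList.length by omega,
    List.map_map]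
  apply List.map_congr_left
  intro k hk
  have hkn : k < s.toList.length := List.mem_range.mp hk
  simp only [Function.comp]
  by_cases hk0 : k = 0
  · subst hk0
    norm_num
  · -- i = k+1 ≥ 2
    rw [if_neg (by omega), if_neg (by omega),
      if_pos (show k + 1 ≤ s.toList.length - 1 + 1 by omega),
      if_neg (show ¬ ((1 : Int) + (k : Nat)) = 1 by omega)]
    have hgv := pyGet_cons_pos s.toList (k + 1) (by omega) (by omega)
    have hgv1 : PySem.List.pyGet? (' ' :: s.toList) 1 = some (s.toList[0]'(by omega)) := by
      have := pyGet_cons_pos s.toList 1 (le_refl 1) hn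
      exact_mod_cast this
    have hbk : PySem.List.pyGet? s.toList ((1 : Int) + (k : Nat) - 1) = some (s.toList[k]'(by omega)) := by
      rw [show ((1 : Int) + (k : Nat) - 1) = ((k : Nat) : Int) by ring, PySem.List.pyGet?_natCast,
        List.getElem?_eq_getElem (by omega)]
    have hb0 : PySem.List.pyGet? s.toList 0 = some (s.toList[0]'(by omega)) := by
      rw [PySem.List.pyGet?_zero, List.getElem?_eq_getElem (by omega)]
    have hsimp : s.toList[k + 1 - 1]'(by omega) = s.toList[k]'(by omega) := by simp
    by_cases hch : s.toList[k]'(by omega) = s.toList[0]'(by omega)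
    · rw [if_neg (by intro hne; exact hne (by rw [hgv, hgv1, hsimp, hch])),
        if_pos (by rw [hbk, hb0, hch])]
      rw [show ((1 : Int) + (k : Nat)).toNat = k + 1 by omega,
        show ((1 : Int) + (k : Nat)) = ((k + 1 : Nat) : Int) by push_cast; ring,
        show 2 * (((k + 1 : Nat) : Int)) - 1 = ((k + 1 : Nat) : Int) + ((k + 1 : Nat) : Int) - 1 by ring]
      exact search_eq s.toList (k + 1) (by omega) (by omega) (k + 1) _ _ _ (by omega) (by omega)
    · rw [if_pos (by
        rw [hgv, hgv1, hsimp]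
        intro hsome
        exact hch (Option.some.inj hsome)),
        if_neg (by rw [hbk, hb0]; intro hsome; exact hch (Option.some.inj hsome))]
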